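-- pv_equiv track=rewrite | github.com/Leibniz-IWT/ddgclib | benchmarks/Cylinder/_cylinder_volume_pt1_Mesh_Quadrics.py | get_2ring_neighbors
-- ===== SOURCE A (Python) =====
-- def get_2ring_neighbors(v, neighbors):
--     ring1 = set(neighbors[v])
--     ring2 = set()
--     for u in ring1:
--         ring2.update(neighbors[u])
--     ring2.update(ring1)
--     ring2.add(v)
--     return list(ring2)
-- ===== SOURCE B (Python) =====
-- def get_2ring_neighbors(v, neighbors):
--     # distance-bounded BFS: two expansion levels from v
--     visited = {v}
--     frontier = [v]
--     for _ in range(2):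
--         nxt = []
--         for u in frontier:
--             for w in neighbors[u]:
--                 if w not in visited:
--                     visited.add(w)
--                     nxt.append(w)
--         frontier = nxt
--     return sorted(visited)
-- ===== Notes on version B (the rewrite author's own statement) =====
-- stated objective: alternative
-- what changed: B replaces A's staged set unions (ring1, then a union of all ring1 neighbor lists, then merging) by a distance-bounded breadth-first search: a visited set and a frontier, expanded exactly two levels from v, so each node's neighbor list is scanned once at the moment the node is discovered and already-visited nodes are skipped; the returned collection is the same set (A's list(set) order is hash-arbitrary, B emits it sorted).
import Mathlib
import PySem

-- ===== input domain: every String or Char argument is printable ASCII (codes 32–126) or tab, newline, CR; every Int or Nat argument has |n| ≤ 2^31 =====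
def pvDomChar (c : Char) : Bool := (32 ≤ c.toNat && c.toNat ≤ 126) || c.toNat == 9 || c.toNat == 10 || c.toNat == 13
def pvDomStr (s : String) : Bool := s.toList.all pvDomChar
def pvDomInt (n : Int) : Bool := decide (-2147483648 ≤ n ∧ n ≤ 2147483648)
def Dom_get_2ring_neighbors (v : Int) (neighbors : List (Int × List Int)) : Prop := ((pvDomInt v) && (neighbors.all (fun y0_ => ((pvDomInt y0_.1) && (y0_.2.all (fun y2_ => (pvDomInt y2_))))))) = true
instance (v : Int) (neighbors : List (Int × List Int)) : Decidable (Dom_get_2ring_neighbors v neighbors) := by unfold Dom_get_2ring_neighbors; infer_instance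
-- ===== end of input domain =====

-- B replaces A's staged set unions by a two-level breadth-first search from v (visited set + frontier).
-- Both return the same SET; Python's list(set) iteration order is hash-dependent and not modelled
-- (outputs are compared as sets), so both ports enumerate the final set in ascending order.

-- ===== PORT A =====
-- neighbors[u] is modelled totally via getD []; Pre_ below excludes the KeyError inputs.
def pvNb (d : PySem.Dict Int (List Int)) (u : Int) : List Int :=
  (PySem.Dict.get? d u).getD []

-- A: ring1 = set(neighbors[v]); for u in ring1: ring2.update(neighbors[u]); ring2.update(ring1);
-- ring2.add(v); return list(ring2) (set enumeration order: ascending, see header).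
def get_2ring_neighbors (v : Int) (neighbors : List (Int × List Int)) : List Int :=
  let d := PySem.Dict.ofList neighbors
  let ring1 : PySem.Set Int := PySem.Set.ofList (pvNb d v)
  let ring2 : PySem.Set Int :=
    ring1.foldl (fun s u => PySem.Set.update s (pvNb d u)) PySem.Set.empty
  let ring2 := PySem.Set.update ring2 ring1
  let ring2 := PySem.Set.add ring2 v
  PySem.List.sorted ring2 (fun x => x) false

-- ===== PORT B =====
-- body of 'for w in neighbors[u]': if w not in visited: visited.add(w); nxt.append(w)
-- state = (visited, nxt)
def pvStep (st : PySem.Set Int × List Int) (w : Int) : PySem.Set Int × List Int :=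
  if PySem.Set.contains st.1 w then st else (PySem.Set.add st.1 w, st.2 ++ [w])

-- body of 'for u in frontier'
def pvVisit (d : PySem.Dict Int (List Int)) (st : PySem.Set Int × List Int) (u : Int) :
    PySem.Set Int × List Int :=
  (pvNb d u).foldl pvStep st

-- one outer iteration: nxt = []; for u in frontier: …; frontier = nxt
def pvLevel (d : PySem.Dict Int (List Int)) (st : PySem.Set Int × List Int) :
    PySem.Set Int × List Int :=
  st.2.foldl (pvVisit d) (st.1, [])

-- B: visited = {v}; frontier = [v]; for _ in range(2): expand one level; return sorted(visited)
def get_2ring_neighbors_alt (v : Int) (neighbors : List (Int × List Int)) : List Int :=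
  let d := PySem.Dict.ofList neighbors
  let st := (PySem.List.pyRange 0 2 1).foldl (fun st _ => pvLevel d st)
    (PySem.Set.add PySem.Set.empty v, [v])
  PySem.List.sorted st.1 (fun x => x) false

-- ===== PRECONDITION & SPEC =====
-- Pre_: exactly the inputs where the Python A returns (v is a key and every listed neighbor of v
-- is a key); elsewhere A raises KeyError (and so does B).
def Pre_get_2ring_neighbors (v : Int) (neighbors : List (Int × List Int)) : Prop :=
  (PySem.Dict.get? (PySem.Dict.ofList neighbors) v).isSome = true ∧
  ∀ u ∈ (PySem.Dict.get? (PySem.Dict.ofList neighbors) v).getD [],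
    (PySem.Dict.get? (PySem.Dict.ofList neighbors) u).isSome = true
instance (v : Int) (neighbors : List (Int × List Int)) : Decidable (Pre_get_2ring_neighbors v neighbors) := by unfold Pre_get_2ring_neighbors; infer_instance
def pvWitness_get_2ring_neighbors : Int × (List (Int × List Int)) := (0, [(0, [1]), (1, [0])])

def Spec_get_2ring_neighbors (v : Int) (neighbors : List (Int × List Int)) (out : List Int) : Prop := out = get_2ring_neighbors_alt v neighbors
instance (v : Int) (neighbors : List (Int × List Int)) (out : List Int) : Decidable (Spec_get_2ring_neighbors v neighbors out) := by unfold Spec_get_2ring_neighbors; infer_instance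

-- ===== CLAIM =====
def Claim_equal_get_2ring_neighbors : Prop := ∀ (v : Int) (neighbors : List (Int × List Int)), Dom_get_2ring_neighbors v neighbors → Pre_get_2ring_neighbors v neighbors → Spec_get_2ring_neighbors v neighbors (get_2ring_neighbors v neighbors)

-- ===== LEMMAS AND PROOFS =====

-- the visited component of pvStep is always a set-add (add is a no-op when present)
theorem pvStep_fst (st : PySem.Set Int × List Int) (w : Int) :
    (pvStep st w).1 = PySem.Set.add st.1 w := by
  simp only [pvStep, PySem.Set.add]
  split <;> simp_all

-- inner loop: the visited set after scanning ws is visited.update(ws)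
theorem foldl_step_fst (ws : List Int) (st : PySem.Set Int × List Int) :
    (ws.foldl pvStep st).1 = PySem.Set.update st.1 ws := by
  induction ws generalizing st with
  | nil => simp [PySem.Set.update]
  | cons w t ih =>
      simp only [List.foldl_cons, ih, PySem.Set.update, List.foldl_cons, pvStep_fst]

-- inner loop: membership in nxt
theorem foldl_step_snd_mem (ws : List Int) (st : PySem.Set Int × List Int) (x : Int) :
    x ∈ (ws.foldl pvStep st).2 ↔ x ∈ st.2 ∨ (x ∈ ws ∧ x ∉ st.1) := by
  induction ws generalizing st with
  | nil => simp
  | cons w t ih =>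
      simp only [List.foldl_cons]
      by_cases hw : PySem.Set.contains st.1 w = true
      · have hw' : w ∈ st.1 := (PySem.Set.contains_iff _ _).mp hw
        rw [show pvStep st w = st from by simp [pvStep, hw']]
        rw [ih]
        by_cases hxw : x = w
        · subst hxw; simp [hw']
        · simp [List.mem_cons, hxw]
      · have hw' : w ∉ st.1 := fun h => hw ((PySem.Set.contains_iff _ _).mpr h)
        rw [show pvStep st w = (PySem.Set.add st.1 w, st.2 ++ [w]) from by
          simp [pvStep, hw']]
        rw [ih]
        by_cases hxw : x = w
        · subst hxw; simp [hw']
        · simp [List.mem_cons, hxw, PySem.Set.mem_add]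

-- one BFS level: the visited set
theorem level_fold_fst_mem (d : PySem.Dict Int (List Int)) (f : List Int)
    (st : PySem.Set Int × List Int) (x : Int) :
    x ∈ (f.foldl (pvVisit d) st).1 ↔ x ∈ st.1 ∨ ∃ u ∈ f, x ∈ pvNb d u := by
  induction f generalizing st with
  | nil => simp
  | cons u t ih =>
      simp only [List.foldl_cons, ih, pvVisit, foldl_step_fst, PySem.Set.mem_update,
        List.mem_cons]
      constructor
      · rintro ((h | h) | ⟨u', hu', hx⟩)
        exacts [Or.inl h, Or.inr ⟨u, Or.inl rfl, h⟩, Or.inr ⟨u', Or.inr hu', hx⟩]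
      · rintro (h | ⟨u', (rfl | hu'), hx⟩)
        exacts [Or.inl (Or.inl h), Or.inl (Or.inr hx), Or.inr ⟨u', hu', hx⟩]

-- one BFS level: the visited set stays duplicate-free
theorem level_fold_fst_nodup (d : PySem.Dict Int (List Int)) (f : List Int)
    (st : PySem.Set Int × List Int) (h : st.1.Nodup) :
    (f.foldl (pvVisit d) st).1.Nodup := by
  induction f generalizing st with
  | nil => exact h
  | cons u t ih =>
      refine ih _ ?_
      simp only [pvVisit, foldl_step_fst]
      exact PySem.Set.nodup_update _ _ h

-- one BFS level: membership in the next frontier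
theorem level_fold_snd_mem (d : PySem.Dict Int (List Int)) (f : List Int)
    (st : PySem.Set Int × List Int) (x : Int) :
    x ∈ (f.foldl (pvVisit d) st).2 ↔
      x ∈ st.2 ∨ (x ∉ st.1 ∧ ∃ u ∈ f, x ∈ pvNb d u) := by
  induction f generalizing st with
  | nil => simp
  | cons u t ih =>
      simp only [List.foldl_cons, ih, pvVisit, foldl_step_fst, foldl_step_snd_mem,
        PySem.Set.mem_update, List.mem_cons]
      constructor
      · rintro ((h | ⟨h1, h2⟩) | ⟨hn, u', hu', hx⟩)
        · exact Or.inl h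
        · exact Or.inr ⟨h2, u, Or.inl rfl, h1⟩
        · exact Or.inr ⟨fun c => hn (Or.inl c), u', Or.inr hu', hx⟩
      · rintro (h | ⟨hn, u', (rfl | hu'), hx⟩)
        · exact Or.inl (Or.inl h)
        · exact Or.inl (Or.inr ⟨hx, hn⟩)
        · by_cases hx1 : x ∈ pvNb d u
          · exact Or.inl (Or.inr ⟨hx1, hn⟩)
          · exact Or.inr ⟨fun c => hx1 (c.resolve_left hn), u', hu', hx⟩

-- A's accumulation loop: membership
theorem ring2_fold_mem (d : PySem.Dict Int (List Int)) (l : List Int) (s0 : PySem.Set Int)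
    (x : Int) :
    x ∈ (l.foldl (fun s u => PySem.Set.update s (pvNb d u)) s0) ↔
      x ∈ s0 ∨ ∃ u ∈ l, x ∈ pvNb d u := by
  induction l generalizing s0 with
  | nil => simp
  | cons u t ih =>
      simp only [List.foldl_cons, ih, PySem.Set.mem_update, List.mem_cons]
      constructor
      · rintro ((h | h) | ⟨u', hu', hx⟩)
        exacts [Or.inl h, Or.inr ⟨u, Or.inl rfl, h⟩, Or.inr ⟨u', Or.inr hu', hx⟩]
      · rintro (h | ⟨u', (rfl | hu'), hx⟩)
        exacts [Or.inl (Or.inl h), Or.inl (Or.inr hx), Or.inr ⟨u', hu', hx⟩]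

-- A's accumulation loop: nodup
theorem ring2_fold_nodup (d : PySem.Dict Int (List Int)) (l : List Int) (s0 : PySem.Set Int)
    (h : s0.Nodup) :
    (l.foldl (fun s u => PySem.Set.update s (pvNb d u)) s0).Nodup := by
  induction l generalizing s0 with
  | nil => exact h
  | cons u t ih => exact ih _ (PySem.Set.nodup_update _ _ h)

-- ===== VERDICT =====
theorem get_2ring_neighbors_spec : Claim_equal_get_2ring_neighbors := by
  intro v neighbors _ _
  show get_2ring_neighbors v neighbors = get_2ring_neighbors_alt v neighbors
  unfold get_2ring_neighbors get_2ring_neighbors_alt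
  have hr : PySem.List.pyRange 0 2 1 = [0, 1] := by decide
  rw [hr]
  simp only [List.foldl_cons, List.foldl_nil]
  set d := PySem.Dict.ofList neighbors with hd
  apply PySem.List.sorted_eq_sorted_of_perm _ _ _ (fun a b h => h)
  have hA : (PySem.Set.add
      (PySem.Set.update
        ((PySem.Set.ofList (pvNb d v)).foldl (fun s u => PySem.Set.update s (pvNb d u))
          PySem.Set.empty)
        (PySem.Set.ofList (pvNb d v)))
      v).Nodup := by
    refine PySem.Set.nodup_add _ _ (PySem.Set.nodup_update _ _ ?_)
    exact ring2_fold_nodup d _ _ (by decide)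
  have hB : ((pvLevel d (pvLevel d (PySem.Set.add PySem.Set.empty v, [v]))).1).Nodup := by
    refine level_fold_fst_nodup d _ _ ?_
    refine level_fold_fst_nodup d _ _ ?_
    exact PySem.Set.nodup_add PySem.Set.empty v (by decide)
  refine (List.perm_ext_iff_of_nodup hA hB).mpr ?_
  intro x
  have hv0 : ∀ y : Int, y ∈ PySem.Set.add PySem.Set.empty v ↔ y = v := by
    intro y; simp [PySem.Set.empty]
  simp only [pvLevel, level_fold_fst_mem, level_fold_snd_mem, ring2_fold_mem,
    PySem.Set.mem_add, PySem.Set.mem_update, PySem.Set.mem_ofList, hv0,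
    List.mem_singleton, List.not_mem_nil, false_or]
  simp only [PySem.Set.empty, List.not_mem_nil, false_or, exists_eq_left]
  constructor
  · rintro ((⟨u, hu, hx⟩ | h) | h)
    · by_cases huv : u = v
      · subst huv; exact Or.inl (Or.inr hx)
      · exact Or.inr ⟨u, ⟨huv, hu⟩, hx⟩
    · exact Or.inl (Or.inr h)
    · exact Or.inl (Or.inl h)
  · rintro ((h | h) | ⟨u, ⟨hne, hu⟩, hx⟩)
    · exact Or.inr h
    · exact Or.inl (Or.inr h)
    · exact Or.inl (Or.inl ⟨u, hu, hx⟩)
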